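-- pv_equiv track=rewrite | github.com/A-Saavedra/Codigo-Control-NASM | ImplementacionPython/generador_codigo_control.py | calcular_sumatorias_ascii
-- ===== SOURCE A (Python) =====
-- def calcular_sumatorias_ascii(cadena_hex: str):
--     total = 0
--     parciales = [0, 0, 0, 0, 0]
--     for i, char in enumerate(cadena_hex):
--         valor = ord(char)
--         total += valor
--         parciales[i % 5] += valor
--     return total, parciales
-- ===== SOURCE B (Python) =====
-- def calcular_sumatorias_ascii(cadena_hex: str):
--     parciales = [0, 0, 0, 0, 0]
--     for k in range(0, len(cadena_hex), 5):
--         chunk = cadena_hex[k:k+5]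
--         for j, ch in enumerate(chunk):
--             parciales[j] += ord(ch)
--     return sum(parciales), parciales
-- ===== Notes on version B (the rewrite author's own statement) =====
-- stated objective: alternative
-- what changed: B traverses the string in chunks of five via slicing, adding each chunk positionally into the buckets (no modular indexing), and derives the grand total as the sum of the buckets instead of accumulating it per character.
import Mathlib
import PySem

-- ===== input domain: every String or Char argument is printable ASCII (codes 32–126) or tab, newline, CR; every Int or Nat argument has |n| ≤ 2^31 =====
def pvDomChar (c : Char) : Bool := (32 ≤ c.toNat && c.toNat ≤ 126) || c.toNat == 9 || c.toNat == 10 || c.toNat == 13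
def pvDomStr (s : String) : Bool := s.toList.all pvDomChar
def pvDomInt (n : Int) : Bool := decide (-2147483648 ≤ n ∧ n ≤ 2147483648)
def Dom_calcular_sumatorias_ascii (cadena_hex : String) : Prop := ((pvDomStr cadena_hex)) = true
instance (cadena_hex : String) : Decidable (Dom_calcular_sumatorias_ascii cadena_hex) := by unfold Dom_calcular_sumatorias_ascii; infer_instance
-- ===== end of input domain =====

-- B traverses the string in chunks of five via slicing, adding each chunk positionally
-- into the buckets (no modular indexing), and obtains the total as the sum of the buckets
-- (objective: alternative decomposition, same O(n) cost).

-- ===== PORT A =====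
-- for i, char in enumerate(cadena_hex): total += ord(char); parciales[i % 5] += ord(char)
def pvALoop : List Char → Nat → Int → List Int → Int × List Int
  | [], _, total, p => (total, p)
  | c :: t, i, total, p =>
      pvALoop t (i + 1) (total + (c.toNat : Int))
        (p.set (i % 5) (p.getD (i % 5) 0 + (c.toNat : Int)))

def calcular_sumatorias_ascii (cadena_hex : String) : Int × List Int :=
  pvALoop cadena_hex.toList 0 0 [0, 0, 0, 0, 0]

-- ===== PORT B =====
-- for j, ch in enumerate(chunk): parciales[j] += ord(ch)
def pvBInner : List Char → Nat → List Int → List Int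
  | [], _, p => p
  | c :: t, j, p => pvBInner t (j + 1) (p.set j (p.getD j 0 + (c.toNat : Int)))

-- for k in range(0, len(cadena_hex), 5): … cadena_hex[k:k+5] …; return sum(parciales), parciales
def calcular_sumatorias_ascii_alt (cadena_hex : String) : Int × List Int :=
  let l := cadena_hex.toList
  let parciales :=
    (PySem.List.pyRange 0 (l.length : Int) 5).foldl
      (fun p k => pvBInner (PySem.List.slice l (some k) (some (k + 5))) 0 p)
      [0, 0, 0, 0, 0]
  (parciales.sum, parciales)

-- ===== PRECONDITION & SPEC =====
def Spec_calcular_sumatorias_ascii (cadena_hex : String) (out : Int × List Int) : Prop := out = calcular_sumatorias_ascii_alt cadena_hex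
instance (cadena_hex : String) (out : Int × List Int) : Decidable (Spec_calcular_sumatorias_ascii cadena_hex out) := by unfold Spec_calcular_sumatorias_ascii; infer_instance

-- ===== CLAIM (what is proved, stated in full; the proofs are below) =====
def Claim_equal_calcular_sumatorias_ascii : Prop := ∀ (cadena_hex : String), Dom_calcular_sumatorias_ascii cadena_hex → Spec_calcular_sumatorias_ascii cadena_hex (calcular_sumatorias_ascii cadena_hex)

-- ===== LEMMAS AND PROOFS =====

/-- Sum of the code points of a character list. -/
def pvOrdSum (l : List Char) : Int := (l.map (fun c => (c.toNat : Int))).sum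

/-- A's bucket component alone. -/
def pvAIdx : List Char → Nat → List Int → List Int
  | [], _, p => p
  | c :: t, i, p => pvAIdx t (i + 1) (p.set (i % 5) (p.getD (i % 5) 0 + (c.toNat : Int)))

/-- Chunked recursion: the shape shared by both proofs. -/
def pvChunkRec : List Char → List Int → List Int
  | [], p => p
  | c :: t, p => pvChunkRec ((c :: t).drop 5) (pvBInner ((c :: t).take 5) 0 p)
  termination_by l _ => l.length
  decreasing_by simp [List.length_drop]

theorem pvChunkRec_ne_nil (l : List Char) (p : List Int) (h : l ≠ []) :
    pvChunkRec l p = pvChunkRec (l.drop 5) (pvBInner (l.take 5) 0 p) := by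
  cases l with
  | nil => exact absurd rfl h
  | cons c t => rw [pvChunkRec]

theorem pvOrdSum_append (a b : List Char) : pvOrdSum (a ++ b) = pvOrdSum a + pvOrdSum b := by
  simp [pvOrdSum]

theorem pvALoop_fst (l : List Char) : ∀ (i : Nat) (total : Int) (p : List Int),
    (pvALoop l i total p).1 = total + pvOrdSum l := by
  induction l with
  | nil => intro i total p; simp [pvALoop, pvOrdSum]
  | cons c t ih =>
      intro i total p
      rw [pvALoop, ih]
      simp [pvOrdSum]
      ring

theorem pvALoop_snd (l : List Char) : ∀ (i : Nat) (total : Int) (p : List Int),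
    (pvALoop l i total p).2 = pvAIdx l i p := by
  induction l with
  | nil => intro i total p; simp [pvALoop, pvAIdx]
  | cons c t ih => intro i total p; rw [pvALoop, pvAIdx, ih]

theorem pvBInner_length (l : List Char) : ∀ (j : Nat) (p : List Int),
    (pvBInner l j p).length = p.length := by
  induction l with
  | nil => intro j p; simp [pvBInner]
  | cons c t ih => intro j p; simp [pvBInner, ih]

theorem pv_sum_set (p : List Int) : ∀ (j : Nat) (x : Int), j < p.length →
    (p.set j (p.getD j 0 + x)).sum = p.sum + x := by
  induction p with
  | nil => intro j x hj; simp at hj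
  | cons a q ih =>
      intro j x hj
      cases j with
      | zero => simp; ring
      | succ j =>
          have hj' : j < q.length := by simp at hj; omega
          simp only [List.getD_cons_succ, List.set_cons_succ, List.sum_cons, ih j x hj']
          ring

theorem pvBInner_sum (l : List Char) : ∀ (j : Nat) (p : List Int), j + l.length ≤ p.length →
    (pvBInner l j p).sum = p.sum + pvOrdSum l := by
  induction l with
  | nil => intro j p _; simp [pvBInner, pvOrdSum]
  | cons c t ih =>
      intro j p h
      have hj : j < p.length := by simp at h; omega
      rw [pvBInner, ih (j + 1) _ (by simp [List.length_set]; simp at h; omega),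
          pv_sum_set p j _ hj]
      simp [pvOrdSum]
      ring

theorem pvChunkRec_sum : ∀ (l : List Char) (p : List Int), 5 ≤ p.length →
    (pvChunkRec l p).sum = p.sum + pvOrdSum l := by
  intro l p
  induction l, p using pvChunkRec.induct with
  | case1 p => intro _; simp [pvChunkRec, pvOrdSum]
  | case2 c t p ih =>
      intro hp
      rw [pvChunkRec, ih (by rw [pvBInner_length]; exact hp),
          pvBInner_sum _ 0 p (by simp [List.length_take]; omega)]
      conv_rhs => rw [← List.take_append_drop 5 (c :: t)]
      rw [pvOrdSum_append]
      ring

theorem pvAIdx_chunk : ∀ (n : Nat) (l : List Char) (i : Nat) (p : List Int),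
    l.length ≤ n → i % 5 = 0 → pvAIdx l i p = pvChunkRec l p := by
  intro n
  induction n with
  | zero =>
      intro l i p h _
      have hnil : l = [] := List.length_eq_zero_iff.mp (by omega)
      subst hnil
      simp [pvAIdx, pvChunkRec]
  | succ n ih =>
      intro l i p h h0
      have h1 : (i + 1) % 5 = 1 := by omega
      have h2 : (i + 1 + 1) % 5 = 2 := by omega
      have h3 : (i + 1 + 1 + 1) % 5 = 3 := by omega
      have h4 : (i + 1 + 1 + 1 + 1) % 5 = 4 := by omega
      have h5 : (i + 1 + 1 + 1 + 1 + 1) % 5 = 0 := by omega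
      match l with
      | [] => simp [pvAIdx, pvChunkRec]
      | [c0] => simp [pvAIdx, pvChunkRec, pvBInner, h0]
      | [c0, c1] => simp [pvAIdx, pvChunkRec, pvBInner, h0, h1]
      | [c0, c1, c2] => simp [pvAIdx, pvChunkRec, pvBInner, h0, h1, h2]
      | [c0, c1, c2, c3] => simp [pvAIdx, pvChunkRec, pvBInner, h0, h1, h2, h3]
      | c0 :: c1 :: c2 :: c3 :: c4 :: t =>
          rw [pvChunkRec_ne_nil _ _ (by simp)]
          simp only [pvAIdx, pvBInner, List.take, List.drop, h0, h1, h2, h3, h4]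
          rw [ih t (i + 1 + 1 + 1 + 1 + 1) _ (by simp at h; omega) h5]

theorem pvPyRange_nil (a b : Int) (h : ¬ a < b) : PySem.List.pyRange a b 5 = [] := by
  rw [PySem.List.pyRange_of_pos a b (by norm_num)]
  simp [h]

theorem pvPyRange_cons (a b : Int) (h : a < b) :
    PySem.List.pyRange a b 5 = a :: PySem.List.pyRange (a + 5) b 5 := by
  rw [PySem.List.pyRange_of_pos a b (by norm_num),
      PySem.List.pyRange_of_pos (a + 5) b (by norm_num)]
  have hcount : ((b - a + 5 - 1) / 5).toNat
      = (if a + 5 < b then ((b - (a + 5) + 5 - 1) / 5).toNat else 0) + 1 := by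
    split_ifs <;> omega
  rw [if_pos h, hcount, List.range_succ_eq_map]
  simp only [List.map_cons, List.map_map, Nat.cast_zero, mul_zero, add_zero]
  congr 1
  apply List.map_congr_left
  intro k _
  simp [Function.comp]
  ring_nf

theorem pvFoldAux : ∀ (n : Nat) (l0 : List Char) (d : Nat) (p : List Int), l0.length - d ≤ n →
    ((PySem.List.pyRange (d : Int) (l0.length : Int) 5).foldl
      (fun p k => pvBInner (PySem.List.slice l0 (some k) (some (k + 5))) 0 p) p)
    = pvChunkRec (l0.drop d) p := by
  intro n
  induction n with
  | zero =>
      intro l0 d p h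
      rw [pvPyRange_nil _ _ (by exact_mod_cast (by omega : ¬ d < l0.length))]
      rw [List.drop_eq_nil_of_le (by omega)]
      simp [pvChunkRec]
  | succ n ih =>
      intro l0 d p h
      by_cases hd : d < l0.length
      · rw [pvPyRange_cons _ _ (by exact_mod_cast hd)]
        simp only [List.foldl_cons]
        have hsl : PySem.List.slice l0 (some (d : Int)) (some ((d : Int) + 5))
            = (l0.drop d).take 5 := by
          have h5 : ((d : Int) + 5) = ((d : Int) + ((5 : Nat) : Int)) := by push_cast; ring
          rw [h5, PySem.List.slice_natCast_add]
        rw [hsl]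
        have hcast : ((d : Int) + 5) = (((d + 5 : Nat)) : Int) := by push_cast; ring
        rw [hcast, ih l0 (d + 5) _ (by omega)]
        rw [pvChunkRec_ne_nil (l0.drop d) p (by simp [List.drop_eq_nil_iff]; omega)]
        rw [List.drop_drop]
      · rw [pvPyRange_nil _ _ (by exact_mod_cast hd)]
        rw [List.drop_eq_nil_of_le (by omega)]
        simp [pvChunkRec]

-- ===== VERDICT (by name: the statement is the Claim_ definition above) =====
theorem calcular_sumatorias_ascii_spec : Claim_equal_calcular_sumatorias_ascii := by
  intro s _
  simp only [Spec_calcular_sumatorias_ascii, calcular_sumatorias_ascii,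
    calcular_sumatorias_ascii_alt]
  have hfold := pvFoldAux s.toList.length s.toList 0 [0, 0, 0, 0, 0] (by omega)
  simp only [Nat.cast_zero, List.drop_zero] at hfold
  rw [hfold]
  refine Prod.ext ?_ ?_
  · rw [pvALoop_fst, pvChunkRec_sum _ _ (by simp)]
    simp
  · rw [pvALoop_snd, pvAIdx_chunk s.toList.length s.toList 0 _ (le_refl _) (by omega)]
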